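-- pv_equiv track=rewrite | github.com/Vishall302/Tally-Export | tally_groups.py | get_root_primary
-- ===== SOURCE A (Python) =====
-- PRIMARY_NATURE = {
--     "Capital Account":           ("Liability", "Balance Sheet"),
--     "Reserves & Surplus":        ("Liability", "Balance Sheet"),
--     "Loans (Liability)":         ("Liability", "Balance Sheet"),
--     "Current Liabilities":       ("Liability", "Balance Sheet"),
--     "Provisions":                ("Liability", "Balance Sheet"),
--     "Suspense A/c":              ("Liability", "Balance Sheet"),
--     "Branch / Divisions":        ("Liability", "Balance Sheet"),
--     "Expenses Payable":          ("Liability", "Balance Sheet"),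
--     "Fixed Assets":              ("Asset",     "Balance Sheet"),
--     "Current Assets":            ("Asset",     "Balance Sheet"),
--     "Investments":               ("Asset",     "Balance Sheet"),
--     "Loans & Advances (Asset)":  ("Asset",     "Balance Sheet"),
--     "Misc. Expenses (ASSET)":    ("Asset",     "Balance Sheet"),
--     "Deposits (Asset)":          ("Asset",     "Balance Sheet"),
--     "Sales Accounts":            ("Income",    "P&L"),
--     "Direct Incomes":            ("Income",    "P&L"),
--     "Indirect Incomes":          ("Income",    "P&L"),
--     "Purchase Accounts":         ("Expense",   "P&L"),
--     "Direct Expenses":           ("Expense",   "P&L"),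
--     "Indirect Expenses":         ("Expense",   "P&L"),
--     "Primary":                   ("Primary",   "Root"),
-- }
--
-- def get_root_primary(name, groups_dict, depth=0):
--     """Recursively walk up to find the Tally primary group ancestor."""
--     if depth > 20:  # prevent infinite loop
--         return name
--     if name in PRIMARY_NATURE:
--         return name
--     info = groups_dict.get(name)
--     if not info or not info["parent"]:
--         return name
--     return get_root_primary(info["parent"], groups_dict, depth + 1)
-- ===== SOURCE B (Python) =====
-- PRIMARY_NATURE = {
--     "Capital Account":           ("Liability", "Balance Sheet"),
--     "Reserves & Surplus":        ("Liability", "Balance Sheet"),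
--     "Loans (Liability)":         ("Liability", "Balance Sheet"),
--     "Current Liabilities":       ("Liability", "Balance Sheet"),
--     "Provisions":                ("Liability", "Balance Sheet"),
--     "Suspense A/c":              ("Liability", "Balance Sheet"),
--     "Branch / Divisions":        ("Liability", "Balance Sheet"),
--     "Expenses Payable":          ("Liability", "Balance Sheet"),
--     "Fixed Assets":              ("Asset",     "Balance Sheet"),
--     "Current Assets":            ("Asset",     "Balance Sheet"),
--     "Investments":               ("Asset",     "Balance Sheet"),
--     "Loans & Advances (Asset)":  ("Asset",     "Balance Sheet"),
--     "Misc. Expenses (ASSET)":    ("Asset",     "Balance Sheet"),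
--     "Deposits (Asset)":          ("Asset",     "Balance Sheet"),
--     "Sales Accounts":            ("Income",    "P&L"),
--     "Direct Incomes":            ("Income",    "P&L"),
--     "Indirect Incomes":          ("Income",    "P&L"),
--     "Purchase Accounts":         ("Expense",   "P&L"),
--     "Direct Expenses":           ("Expense",   "P&L"),
--     "Indirect Expenses":         ("Expense",   "P&L"),
--     "Primary":                   ("Primary",   "Root"),
-- }
--
-- def _parent_of(name, groups_dict):
--     info = groups_dict.get(name)
--     return info["parent"] if info else None
--
-- def get_root_primary(name, groups_dict, depth=0):
--     """Iteratively walk up to find the Tally primary group ancestor."""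
--     for _ in range(max(0, 21 - depth)):
--         if name in PRIMARY_NATURE:
--             return name
--         parent = _parent_of(name, groups_dict)
--         if not parent:
--             return name
--         name = parent
--     return name
-- ===== Notes on version B (the rewrite author's own statement) =====
-- stated objective: idiomatic
-- what changed: Replaces the self-recursive walk (which threads an explicit depth counter through call frames) with a flat bounded for-loop over range(max(0, 21 - depth)) that rebinds name, with the parent lookup factored into a helper; no recursion, constant stack.
-- outside the precondition, e.g. on get_root_primary('x', {'y': {'parent': 'z'}, 'z': {'a': 'b'}}, 0): A returns 'x', B returns 'x'; on get_root_primary('x', {'x': {'parent': 'y'}}, -1000): A returns 'y', B returns 'y'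
import Mathlib
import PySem

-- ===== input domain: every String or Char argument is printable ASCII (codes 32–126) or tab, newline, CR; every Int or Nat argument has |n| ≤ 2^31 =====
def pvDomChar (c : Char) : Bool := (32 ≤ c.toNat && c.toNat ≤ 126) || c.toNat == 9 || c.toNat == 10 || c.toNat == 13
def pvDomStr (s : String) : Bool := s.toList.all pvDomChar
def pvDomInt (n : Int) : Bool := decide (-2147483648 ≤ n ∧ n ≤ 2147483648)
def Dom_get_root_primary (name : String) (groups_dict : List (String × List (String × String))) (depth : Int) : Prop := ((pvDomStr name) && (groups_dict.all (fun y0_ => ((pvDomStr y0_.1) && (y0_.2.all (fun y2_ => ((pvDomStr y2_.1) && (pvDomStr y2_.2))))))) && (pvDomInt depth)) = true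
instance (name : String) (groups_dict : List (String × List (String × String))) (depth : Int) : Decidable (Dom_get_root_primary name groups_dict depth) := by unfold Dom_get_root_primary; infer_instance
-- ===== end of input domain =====

-- B replaces A's self-recursion by a flat bounded for-loop over range(max(0, 21 - depth)) that
-- rebinds `name`, with the parent lookup factored into a helper (idiomatic; same return value).

-- shared module constant (same in Source A and Source B); only its keys matter here
def PRIMARY_NATURE : PySem.Dict String (String × String) := PySem.Dict.ofList [
  ("Capital Account",          ("Liability", "Balance Sheet")),
  ("Reserves & Surplus",       ("Liability", "Balance Sheet")),
  ("Loans (Liability)",        ("Liability", "Balance Sheet")),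
  ("Current Liabilities",      ("Liability", "Balance Sheet")),
  ("Provisions",               ("Liability", "Balance Sheet")),
  ("Suspense A/c",             ("Liability", "Balance Sheet")),
  ("Branch / Divisions",       ("Liability", "Balance Sheet")),
  ("Expenses Payable",         ("Liability", "Balance Sheet")),
  ("Fixed Assets",             ("Asset",     "Balance Sheet")),
  ("Current Assets",           ("Asset",     "Balance Sheet")),
  ("Investments",              ("Asset",     "Balance Sheet")),
  ("Loans & Advances (Asset)", ("Asset",     "Balance Sheet")),
  ("Misc. Expenses (ASSET)",   ("Asset",     "Balance Sheet")),
  ("Deposits (Asset)",         ("Asset",     "Balance Sheet")),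
  ("Sales Accounts",           ("Income",    "P&L")),
  ("Direct Incomes",           ("Income",    "P&L")),
  ("Indirect Incomes",         ("Income",    "P&L")),
  ("Purchase Accounts",        ("Expense",   "P&L")),
  ("Direct Expenses",          ("Expense",   "P&L")),
  ("Indirect Expenses",        ("Expense",   "P&L")),
  ("Primary",                  ("Primary",   "Root"))]

-- ===== PORT A =====
-- literal port of A's recursion; where Python would raise KeyError (non-empty info without a
-- "parent" key) the `none` branch returns `name` — those inputs are excluded by Pre_.
def get_root_primary (name : String) (groups_dict : List (String × List (String × String))) (depth : Int) : String :=
  if depth > 20 then name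
  else if PRIMARY_NATURE.contains name then name
  else
    match (PySem.Dict.ofList groups_dict).get? name with
    | none => name
    | some info =>
      if (PySem.Dict.ofList info).items = [] then name
      else
        match (PySem.Dict.ofList info).get? "parent" with
        | none => name            -- Python: KeyError (outside Pre_)
        | some parent =>
          if parent = "" then name
          else get_root_primary parent groups_dict (depth + 1)
  termination_by (21 - depth).toNat
  decreasing_by omega

-- ===== PORT B =====
-- port of Source B's helper _parent_of; `none` covers Python's None and the KeyError case (outside Pre_)
def pvParentOf (name : String) (groups_dict : List (String × List (String × String))) : Option String :=
  match (PySem.Dict.ofList groups_dict).get? name with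
  | none => none
  | some info =>
    if (PySem.Dict.ofList info).items = [] then none
    else (PySem.Dict.ofList info).get? "parent"

-- the body of Source B's for-loop, fuel = number of remaining iterations
def pvLoop (groups_dict : List (String × List (String × String))) : Nat → String → String
  | 0, name => name
  | Nat.succ fuel, name =>
    if PRIMARY_NATURE.contains name then name
    else
      match pvParentOf name groups_dict with
      | none => name
      | some parent =>
        if parent = "" then name
        else pvLoop groups_dict fuel parent

def get_root_primary_alt (name : String) (groups_dict : List (String × List (String × String))) (depth : Int) : String :=
  pvLoop groups_dict (max 0 (21 - depth)).toNat name

-- ===== PRECONDITION & SPEC =====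
-- Pre_ excludes, unless the walk stops at once (depth > 20 or a primary-group name): (a) inputs where
-- a non-empty group info lacking a "parent" key is reachable in one step (its key is the start name,
-- or a non-"" parent value of some entry) — there A (and B) can raise KeyError — and (b) inputs with
-- depth < -900 together with a usable (non-empty) parent link — there A's recursion can exceed
-- Python's recursion limit (RecursionError) while B's loop would not.
def Pre_get_root_primary (name : String) (groups_dict : List (String × List (String × String))) (depth : Int) : Prop :=
  depth > 20 ∨ PRIMARY_NATURE.contains name = true ∨
  ((∀ p ∈ groups_dict, (p.2 ≠ [] ∧ (PySem.Dict.ofList p.2).get? "parent" = none) →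
      (p.1 ≠ name ∧ ∀ q ∈ groups_dict, (PySem.Dict.ofList q.2).get? "parent" = some p.1 → p.1 = ""))
   ∧ (-900 ≤ depth ∨ ∀ p ∈ groups_dict,
      (PySem.Dict.ofList p.2).get? "parent" = none ∨ (PySem.Dict.ofList p.2).get? "parent" = some ""))
instance (name : String) (groups_dict : List (String × List (String × String))) (depth : Int) : Decidable (Pre_get_root_primary name groups_dict depth) := by unfold Pre_get_root_primary; infer_instance

def pvWitness_get_root_primary : String × (List (String × List (String × String))) × Int :=
  ("Office Rent", [("Office Rent", [("parent", "Indirect Expenses")])], 0)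

def Spec_get_root_primary (name : String) (groups_dict : List (String × List (String × String))) (depth : Int) (out : String) : Prop := out = get_root_primary_alt name groups_dict depth
instance (name : String) (groups_dict : List (String × List (String × String))) (depth : Int) (out : String) : Decidable (Spec_get_root_primary name groups_dict depth out) := by unfold Spec_get_root_primary; infer_instance

-- ===== CLAIM (what is proved, stated in full; the proofs are below) =====
def Claim_equal_get_root_primary : Prop := ∀ (name : String) (groups_dict : List (String × List (String × String))) (depth : Int), Dom_get_root_primary name groups_dict depth → Pre_get_root_primary name groups_dict depth → Spec_get_root_primary name groups_dict depth (get_root_primary name groups_dict depth)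

-- ===== LEMMAS AND PROOFS =====

-- A's recursion and B's fuelled loop agree (everywhere, in fact): the fuel (21 - depth).toNat
-- counts exactly the levels A can still descend before the depth cap fires.
theorem pv_rec_eq_loop (groups_dict : List (String × List (String × String))) :
    ∀ (n : Nat) (depth : Int), (21 - depth).toNat = n →
      ∀ name, get_root_primary name groups_dict depth = pvLoop groups_dict n name := by
  intro n
  induction n with
  | zero =>
    intro depth h name
    have hd : depth > 20 := by omega
    rw [get_root_primary]
    simp [hd, pvLoop]
  | succ k ih =>
    intro depth h name
    have hd : ¬ depth > 20 := by omega
    rw [get_root_primary]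
    simp only [hd, if_false, pvLoop, pvParentOf]
    by_cases hp : PRIMARY_NATURE.contains name
    · simp [hp]
    · simp only [hp, Bool.false_eq_true, if_false]
      cases (PySem.Dict.ofList groups_dict).get? name with
      | none => rfl
      | some info =>
        by_cases he : (PySem.Dict.ofList info).items = []
        · simp [he]
        · simp only [he, if_false]
          cases (PySem.Dict.ofList info).get? "parent" with
          | none => rfl
          | some parent =>
            by_cases hpe : parent = ""
            · simp [hpe]
            · simp only [hpe, if_false]
              exact ih (depth + 1) (by omega) parent

-- ===== VERDICT (by name: the statement is the Claim_ definition above) =====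
theorem get_root_primary_spec : Claim_equal_get_root_primary := by
  intro name groups_dict depth _ _
  unfold Spec_get_root_primary get_root_primary_alt
  exact pv_rec_eq_loop groups_dict ((max 0 (21 - depth)).toNat) depth (by omega) name
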